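-- pv_equiv track=rewrite | github.com/PhasitWo/Chula | Algo/lab2/findHam.py | findHam
-- ===== SOURCE A (Python) =====
-- def findHam(adjacencyMatrix):
--     adj = adjacencyMatrix
--     # Mark all the vertices as not visited
--     visited = [False] * len(adj)
--     result = {"path": [], "cycle": []}
--     path = []
--
--     def dfs(start):
--         visited[start] = True
--         path.append(start)
--         if len(path) == len(adj):
--             # check if this last vertex has an edge to the source vertex
--             if adj[start][path[0]] == 1:
--                 path.append(path[0])
--                 result["cycle"].append(path.copy())
--                 path.pop() # pop source vertex
--             # if not, then we get a hamiltonian path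
--             else:
--                 result["path"].append(path.copy())
--             path.pop()
--             visited[start] = False
--             return
--         for vertex, value in enumerate(adj[start]):
--             if value == 0:  # no edge between start and vertex
--                 continue
--             # if that vertex is not visited, tranverse to that path
--             if not visited[vertex]:
--                 dfs(vertex)
--         # go back 1 step and find another route
--         path.pop()
--         visited[start] = False
--
--     for i in range(len(adj)):
--         dfs(i)
--     return result
-- ===== SOURCE B (Python) =====
-- def findHam(adjacencyMatrix):
--     adj = adjacencyMatrix
--     n = len(adj)
--     # breadth-wise: grow all simple paths one vertex per round, then classify
--     frontier = [[v] for v in range(n)]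
--     for _ in range(n - 1):
--         frontier = [p + [v]
--                     for p in frontier
--                     for v, val in enumerate(adj[p[-1]])
--                     if val != 0 and v not in p]
--     result = {"path": [], "cycle": []}
--     for p in frontier:
--         if adj[p[-1]][p[0]] == 1:
--             result["cycle"].append(p + [p[0]])
--         else:
--             result["path"].append(p)
--     return result
-- ===== Notes on version B (the rewrite author's own statement) =====
-- stated objective: alternative
-- what changed: A's recursive backtracking DFS (mutable visited array and shared path, results appended mid-recursion) is replaced by an iterative breadth-wise frontier: start from all single-vertex paths, extend every path by one valid fresh vertex per round for n-1 rounds, then classify the surviving full-length paths into cycles and paths in one final pass.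
import Mathlib
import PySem

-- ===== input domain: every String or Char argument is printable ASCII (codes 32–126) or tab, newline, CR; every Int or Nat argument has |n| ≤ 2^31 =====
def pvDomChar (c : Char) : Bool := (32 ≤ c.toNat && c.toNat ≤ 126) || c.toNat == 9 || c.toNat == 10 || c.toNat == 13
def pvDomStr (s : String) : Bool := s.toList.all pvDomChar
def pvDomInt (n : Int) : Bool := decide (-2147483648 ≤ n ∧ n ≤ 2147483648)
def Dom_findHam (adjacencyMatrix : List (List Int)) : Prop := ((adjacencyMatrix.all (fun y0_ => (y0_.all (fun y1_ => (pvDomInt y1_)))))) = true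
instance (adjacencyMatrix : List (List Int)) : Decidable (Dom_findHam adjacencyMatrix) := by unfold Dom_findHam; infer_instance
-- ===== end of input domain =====

-- B replaces A's recursive backtracking DFS by a breadth-wise frontier that grows all simple
-- paths one vertex per round and classifies the full-length ones at the end (objective: alternative).


-- ===== PORT A =====
-- A's dfs mutates visited/path but restores them before returning, so the port passes them as
-- values and returns only the accumulated result pair (paths, cycles).  The recursion is run on
-- fuel n+1 (the DFS depth is bounded by the path length, which is capped at n); on inputs
-- satisfying Pre_ the fuel never runs out.  Indexing uses getD: on Pre_ inputs every index
-- Python touches is in range, so getD equals Python's subscript there.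
def pvDfsA (adj : List (List Int)) : Nat → Int → List Bool → List Int → List (List Int) × List (List Int) → List (List Int) × List (List Int)
  | 0, _, _, _, res => res
  | fuel+1, start, visited, path, res =>
    let visited' := visited.set start.toNat true
    let path' := path ++ [start]
    if path'.length = adj.length then
      if (adj.getD start.toNat []).getD (path'.getD 0 0).toNat 0 = 1 then
        (res.1, res.2 ++ [path' ++ [path'.getD 0 0]])
      else
        (res.1 ++ [path'], res.2)
    else
      (PySem.List.enumerate (adj.getD start.toNat [])).foldl
        (fun r vv =>
          if vv.2 = 0 then r
          else if visited'.getD vv.1.toNat false then r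
          else pvDfsA adj fuel vv.1 visited' path' r) res

def findHam (adjacencyMatrix : List (List Int)) : List (String × List (List Int)) :=
  let adj := adjacencyMatrix
  let res := (List.range adj.length).foldl
    (fun r i => pvDfsA adj (adj.length + 1) (Int.ofNat i) (List.replicate adj.length false) [] r)
    ([], [])
  [("path", res.1), ("cycle", res.2)]

-- ===== PORT B =====
-- one extension round applied to one partial path p: all p ++ [v] for (v, val) in
-- enumerate(adj[p[-1]]) with val != 0 and v fresh
def pvStepB (adj : List (List Int)) (p : List Int) : List (List Int) :=
  ((PySem.List.enumerate (adj.getD (PySem.List.pyGetD p (-1) 0).toNat [])).filter (fun vv =>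
      (vv.2 != 0) && !(p.contains vv.1))).map
    (fun vv => p ++ [vv.1])

def findHam_alt (adjacencyMatrix : List (List Int)) : List (String × List (List Int)) :=
  let adj := adjacencyMatrix
  let n := adj.length
  let frontier := (List.range (n - 1)).foldl
      (fun fr _ => fr.flatMap (pvStepB adj))
      ((List.range n).map (fun v => [Int.ofNat v]))
  let res := frontier.foldl
      (fun r p =>
        if (adj.getD (PySem.List.pyGetD p (-1) 0).toNat []).getD (PySem.List.pyGetD p 0 0).toNat 0 = 1 then
          (r.1, r.2 ++ [p ++ [PySem.List.pyGetD p 0 0]])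
        else (r.1 ++ [p], r.2)) ([], [])
  [("path", res.1), ("cycle", res.2)]

-- ===== PRECONDITION & SPEC =====
-- Pre_ is exactly the set of inputs on which A returns normally (no IndexError): for n <= 1 the
-- single row must be nonempty (A reads adj[0][0]); for n >= 2 every row must have only zeros
-- beyond column n-1 (A scans every row, and a nonzero entry there sends A to visited[v] out of
-- range), and no Hamiltonian-valid vertex sequence may end in a row too short for the cycle test
-- adj[p[-1]][p[0]].  Nothing A returns on is excluded.
-- (Bool-valued so that deciding it short-circuits: the Hamiltonian-sequence clause is only
-- examined when some row is shorter than n, the only case in which the cycle test can be out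
-- of range.)
def pvChainB (adj : List (List Int)) (p : List Int) : Bool :=
  (p.zip p.tail).all (fun uv => (adj.getD uv.1.toNat []).getD uv.2.toNat 0 != 0)

def pvPreB (adj : List (List Int)) : Bool :=
  if adj.length ≤ 1 then adj.all (fun row => !row.isEmpty)
  else if !(adj.all (fun row => (row.drop adj.length).all (fun x => x == 0))) then false
  else if adj.all (fun row => adj.length ≤ row.length) then true
  -- two vertices without incoming (or without outgoing) edges: no Hamiltonian-valid
  -- sequence exists, so the cycle test is never reached and A returns
  else if 2 ≤ ((List.range adj.length).filter (fun v =>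
         (List.range adj.length).all (fun u => (adj.getD u []).getD v 0 == 0))).length then true
  else if 2 ≤ ((List.range adj.length).filter (fun u =>
         (List.range adj.length).all (fun v => (adj.getD u []).getD v 0 == 0))).length then true
  else (PySem.List.permutations ((List.range adj.length).map Int.ofNat) adj.length).all
    (fun p => !(pvChainB adj p)
      || decide ((p.headD 0).toNat < (adj.getD (p.getLastD 0).toNat []).length))

def Pre_findHam (adjacencyMatrix : List (List Int)) : Prop :=
  pvPreB adjacencyMatrix = true
instance (adjacencyMatrix : List (List Int)) : Decidable (Pre_findHam adjacencyMatrix) := by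
  unfold Pre_findHam; infer_instance
def pvWitness_findHam : List (List Int) := [[0, 1], [1, 0]]

def Spec_findHam (adjacencyMatrix : List (List Int)) (out : List (String × List (List Int))) : Prop := out = findHam_alt adjacencyMatrix
instance (adjacencyMatrix : List (List Int)) (out : List (String × List (List Int))) : Decidable (Spec_findHam adjacencyMatrix out) := by unfold Spec_findHam; infer_instance

-- ===== CLAIM (what is proved, stated in full; the proofs are below) =====
def Claim_equal_findHam : Prop := ∀ (adjacencyMatrix : List (List Int)), Dom_findHam adjacencyMatrix → Pre_findHam adjacencyMatrix → Spec_findHam adjacencyMatrix (findHam adjacencyMatrix)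

-- ===== LEMMAS AND PROOFS =====

-- B's classifier test/closure as named functions
def pvCyc (adj : List (List Int)) (p : List Int) : Bool :=
  (adj.getD (PySem.List.pyGetD p (-1) 0).toNat []).getD (PySem.List.pyGetD p 0 0).toNat 0 == 1
def pvClose (p : List Int) : List Int := p ++ [PySem.List.pyGetD p 0 0]
def pvCls (adj : List (List Int)) (l : List (List Int)) : List (List Int) × List (List Int) :=
  (l.filter (fun p => !pvCyc adj p), (l.filter (pvCyc adj)).map pvClose)

-- k extension rounds (applied last-round-last, matching B's foldl over range)
def pvGrow (adj : List (List Int)) : Nat → List (List Int) → List (List Int)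
  | 0, l => l
  | k+1, l => (pvGrow adj k l).flatMap (pvStepB adj)

-- the visited list as the indicator of the current path
def pvMask (n : Nat) (p : List Int) : List Bool :=
  (List.range n).map (fun j => decide ((Int.ofNat j) ∈ p))

lemma pvCls_append (adj : List (List Int)) (a b : List (List Int)) :
    pvCls adj (a ++ b) = ((pvCls adj a).1 ++ (pvCls adj b).1, (pvCls adj a).2 ++ (pvCls adj b).2) := by
  simp [pvCls]

lemma pvCls_flatMap {α : Type} (adj : List (List Int)) (l : List α) (g : α → List (List Int)) :
    pvCls adj (l.flatMap g)
      = (l.flatMap (fun x => (pvCls adj (g x)).1), l.flatMap (fun x => (pvCls adj (g x)).2)) := by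
  induction l with
  | nil => simp [pvCls]
  | cons x xs ih => simp [List.flatMap_cons, pvCls_append, ih]

lemma pvGrow_nil (adj : List (List Int)) (k : Nat) : pvGrow adj k [] = [] := by
  induction k with
  | zero => rfl
  | succ k ih => simp [pvGrow, ih]

lemma pvGrow_append (adj : List (List Int)) (k : Nat) (a b : List (List Int)) :
    pvGrow adj k (a ++ b) = pvGrow adj k a ++ pvGrow adj k b := by
  induction k generalizing a b with
  | zero => rfl
  | succ k ih => simp [pvGrow, ih]

lemma pvGrow_flatMap {α : Type} (adj : List (List Int)) (k : Nat) (l : List α) (g : α → List (List Int)) :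
    pvGrow adj k (l.flatMap g) = l.flatMap (fun x => pvGrow adj k (g x)) := by
  induction l with
  | nil => simp [pvGrow_nil]
  | cons x xs ih => simp [List.flatMap_cons, pvGrow_append, ih]

lemma pvGrow_succ_first (adj : List (List Int)) (k : Nat) (l : List (List Int)) :
    pvGrow adj (k+1) l = pvGrow adj k (l.flatMap (pvStepB adj)) := by
  induction k generalizing l with
  | zero => rfl
  | succ k ih => rw [show k+1+1 = (k+1)+1 from rfl]; rw [pvGrow, ih, pvGrow]

lemma pvGrow_foldl (adj : List (List Int)) (k : Nat) (l : List (List Int)) :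
    (List.range k).foldl (fun fr _ => fr.flatMap (pvStepB adj)) l = pvGrow adj k l := by
  induction k generalizing l with
  | zero => rfl
  | succ k ih => rw [List.range_succ, List.foldl_append, ih]; rfl

lemma pvMask_nil (n : Nat) : List.replicate n false = pvMask n [] := by
  simp [pvMask, List.map_const']

lemma pvMask_getD (n : Nat) (p : List Int) (j : Nat) (hj : j < n) :
    (pvMask n p).getD j false = decide ((Int.ofNat j) ∈ p) := by
  rw [List.getD_eq_getElem _ _ (by simp [pvMask]; omega)]
  simp [pvMask]

lemma pvMask_set (n : Nat) (p : List Int) (s : Nat) (hs : s < n) :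
    (pvMask n p).set s true = pvMask n (p ++ [Int.ofNat s]) := by
  apply List.ext_getElem
  · simp [pvMask]
  · intro j h1 h2
    have hj : j < n := by simpa [pvMask] using h2
    by_cases hjs : j = s
    · subst hjs
      rw [List.getElem_set_self (by simp [pvMask]; omega)]
      simp [pvMask]
    · rw [List.getElem_set_ne (by omega)]
      simp only [pvMask, List.getElem_map, List.getElem_range]
      simp [hjs]

lemma pvFoldl_pairs {α : Type} (l : List α) (c : α → Bool) (G H : α → List (List Int))
    (r : List (List Int) × List (List Int)) :
    l.foldl (fun r x => if c x then (r.1 ++ G x, r.2 ++ H x) else r) r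
      = (r.1 ++ (l.filter c).flatMap G, r.2 ++ (l.filter c).flatMap H) := by
  induction l generalizing r with
  | nil => simp
  | cons x xs ih =>
    by_cases hx : c x = true
    · simp [List.foldl_cons, hx, ih, List.flatMap_cons, List.append_assoc]
    · simp only [Bool.not_eq_true] at hx
      simp [List.foldl_cons, hx, ih]

lemma pvCls_singleton (adj : List (List Int)) (p : List Int) :
    pvCls adj [p] = if pvCyc adj p then ([], [pvClose p]) else ([p], []) := by
  by_cases h : pvCyc adj p <;> simp_all [pvCls]

lemma pvFoldl_cls (adj : List (List Int)) (l : List (List Int))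
    (r : List (List Int) × List (List Int)) :
    l.foldl (fun r p =>
        if (adj.getD (PySem.List.pyGetD p (-1) 0).toNat []).getD (PySem.List.pyGetD p 0 0).toNat 0 = 1 then
          (r.1, r.2 ++ [p ++ [PySem.List.pyGetD p 0 0]])
        else (r.1 ++ [p], r.2)) r
      = (r.1 ++ (pvCls adj l).1, r.2 ++ (pvCls adj l).2) := by
  induction l generalizing r with
  | nil => simp [pvCls]
  | cons p ps ih =>
    simp only [List.foldl_cons]
    rw [show p :: ps = [p] ++ ps from rfl, pvCls_append, pvCls_singleton]
    by_cases hc : (adj.getD (PySem.List.pyGetD p (-1) 0).toNat []).getD (PySem.List.pyGetD p 0 0).toNat 0 = 1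
    · have hcyc : pvCyc adj p = true := by unfold pvCyc; exact beq_iff_eq.mpr hc
      rw [if_pos hc, ih, hcyc]
      simp [pvClose, List.append_assoc]
    · have hcyc : pvCyc adj p = false := by unfold pvCyc; exact beq_eq_false_iff_ne.mpr hc
      rw [if_neg hc, ih, hcyc]
      simp [List.append_assoc]

lemma pvPre_zeros (adj : List (List Int)) (h : Pre_findHam adj) (hn : 2 ≤ adj.length) :
    ∀ row ∈ adj, ∀ x ∈ row.drop adj.length, x = 0 := by
  unfold Pre_findHam pvPreB at h
  rw [if_neg (by omega)] at h
  by_cases hc : (adj.all (fun row => ((row.drop adj.length).all (fun x => x == 0)))) = true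
  · intro row hr x hx
    have h1 := List.all_eq_true.mp hc row hr
    have h2 := List.all_eq_true.mp h1 x hx
    simpa using h2
  · rw [if_pos (by simp [hc])] at h
    exact absurd h (by simp)

lemma pvEntry_lt (adj : List (List Int)) (hPre : Pre_findHam adj) (hn : 2 ≤ adj.length)
    (row : List Int) (hrow : row ∈ adj) (k : Nat) (hk : k < row.length)
    (hne : row[k] ≠ (0 : Int)) : k < adj.length := by
  by_contra hge
  have hdl : k - adj.length < (row.drop adj.length).length := by
    rw [List.length_drop]; omega
  have hmem : row[k] ∈ row.drop adj.length := by
    have he : (row.drop adj.length)[k - adj.length]'hdl = row[k]'hk := by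
      rw [List.getElem_drop]
      simp only [show adj.length + (k - adj.length) = k from by omega]
    rw [← he]
    exact List.getElem_mem hdl
  exact hne (pvPre_zeros adj hPre hn row hrow _ hmem)

lemma pvLen_le (n : Nat) (q : List Int) (hnd : q.Nodup)
    (hq : ∀ x ∈ q, ∃ j : Nat, j < n ∧ x = Int.ofNat j) : q.length ≤ n := by
  have hsub : q ⊆ (List.range n).map Int.ofNat := by
    intro x hx
    rcases hq x hx with ⟨j, hj, rfl⟩
    exact List.mem_map.2 ⟨j, List.mem_range.2 hj, rfl⟩
  have := List.Subperm.length_le (List.subperm_of_subset hnd hsub)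
  simpa using this

lemma pvDfsA_main (adj : List (List Int)) (hPre : Pre_findHam adj) :
    ∀ (f : Nat) (p : List Int) (s : Nat),
      s < adj.length →
      (Int.ofNat s) ∉ p →
      (∀ x ∈ p, ∃ j : Nat, j < adj.length ∧ x = Int.ofNat j) →
      p.Nodup →
      adj.length - p.length ≤ f →
      ∀ r, pvDfsA adj f (Int.ofNat s) (pvMask adj.length p) p r
        = (r.1 ++ (pvCls adj (pvGrow adj (adj.length - (p.length+1)) [p ++ [Int.ofNat s]])).1,
           r.2 ++ (pvCls adj (pvGrow adj (adj.length - (p.length+1)) [p ++ [Int.ofNat s]])).2) := by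
  intro f
  induction f with
  | zero =>
    intro p s hs hns hp hnd hf r
    exfalso
    have hqnd : (p ++ [Int.ofNat s]).Nodup := by
      simp [List.nodup_append, hnd]
      intro a ha hh
      rw [hh] at ha
      exact hns ha
    have hqel : ∀ x ∈ p ++ [Int.ofNat s], ∃ j : Nat, j < adj.length ∧ x = Int.ofNat j := by
      intro x hx
      rcases List.mem_append.1 hx with h | h
      · exact hp x h
      · exact ⟨s, hs, by simpa using h⟩
    have := pvLen_le adj.length _ hqnd hqel
    simp at this
    omega
  | succ f ih =>
    intro p s hs hns hp hnd hf r
    have hqnd : (p ++ [Int.ofNat s]).Nodup := by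
      simp [List.nodup_append, hnd]
      intro a ha hh
      rw [hh] at ha
      exact hns ha
    have hqel : ∀ x ∈ p ++ [Int.ofNat s], ∃ j : Nat, j < adj.length ∧ x = Int.ofNat j := by
      intro x hx
      rcases List.mem_append.1 hx with h | h
      · exact hp x h
      · exact ⟨s, hs, by simpa using h⟩
    have hqlen : (p ++ [Int.ofNat s]).length ≤ adj.length := pvLen_le _ _ hqnd hqel
    have hplen : p.length + 1 ≤ adj.length := by simpa using hqlen
    have hset : (pvMask adj.length p).set (Int.ofNat s).toNat true
        = pvMask adj.length (p ++ [Int.ofNat s]) := by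
      rw [show (Int.ofNat s).toNat = s from rfl]; exact pvMask_set _ _ _ hs
    have h1 : PySem.List.pyGetD (p ++ [Int.ofNat s]) (-1) 0 = Int.ofNat s :=
      PySem.List.pyGetD_neg_one_append_singleton p (Int.ofNat s) 0
    have h2 : PySem.List.pyGetD (p ++ [Int.ofNat s]) 0 0 = (p ++ [Int.ofNat s]).getD 0 0 :=
      PySem.List.pyGetD_zero _ _
    simp only [pvDfsA, hset]
    by_cases hfull : (p ++ [Int.ofNat s]).length = adj.length
    · rw [if_pos hfull]
      have hz : adj.length - (p.length + 1) = 0 := by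
        simp at hfull; omega
      rw [hz]
      by_cases hc : (adj.getD (Int.ofNat s).toNat []).getD (((p ++ [Int.ofNat s]).getD 0 0)).toNat 0 = 1
      · have hcyc : pvCyc adj (p ++ [Int.ofNat s]) = true := by
          unfold pvCyc
          rw [h1, h2]
          exact beq_iff_eq.mpr hc
        rw [if_pos hc]
        simp only [pvGrow, pvCls_singleton, if_pos hcyc]
        unfold pvClose
        rw [h2]
        simp
      · have hcyc : pvCyc adj (p ++ [Int.ofNat s]) = false := by
          unfold pvCyc
          rw [h1, h2]
          exact beq_eq_false_iff_ne.mpr hc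
        rw [if_neg hc]
        simp only [pvGrow, pvCls_singleton]
        rw [if_neg (show ¬(pvCyc adj (p ++ [Int.ofNat s]) = true) from by rw [hcyc]; exact Bool.false_ne_true)]
        simp
    · rw [if_neg hfull]
      have hlt : p.length + 1 < adj.length := by
        simp at hfull; omega
      have hn2 : 2 ≤ adj.length := by omega
      have hrowmem : adj.getD s [] ∈ adj := by
        rw [List.getD_eq_getElem _ _ hs]
        exact List.getElem_mem hs
      rw [show (Int.ofNat s).toNat = s from rfl]
      have hcong : ∀ (r' : List (List Int) × List (List Int)) (vv : Int × Int),
          vv ∈ PySem.List.enumerate (adj.getD s []) →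
          (if vv.2 = 0 then r'
           else if (pvMask adj.length (p ++ [Int.ofNat s])).getD vv.1.toNat false = true then r'
           else pvDfsA adj f vv.1 (pvMask adj.length (p ++ [Int.ofNat s])) (p ++ [Int.ofNat s]) r')
          = (if ((vv.2 != 0) && !((p ++ [Int.ofNat s]).contains vv.1)) then
              (r'.1 ++ (pvCls adj (pvGrow adj (adj.length - (p.length + 2)) [(p ++ [Int.ofNat s]) ++ [vv.1]])).1,
               r'.2 ++ (pvCls adj (pvGrow adj (adj.length - (p.length + 2)) [(p ++ [Int.ofNat s]) ++ [vv.1]])).2)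
            else r') := by
        intro r' vv hvv
        obtain ⟨k, hklt, rfl⟩ := (PySem.List.mem_enumerate_iff _ _ _).mp hvv
        simp only [zero_add]
        by_cases h0 : (adj.getD s [])[k] = (0 : Int)
        · rw [h0]; simp
        · have hkn : k < adj.length := pvEntry_lt adj hPre hn2 _ hrowmem k hklt h0
          rw [if_neg h0, show ((k : Int)).toNat = k from rfl, pvMask_getD _ _ _ hkn]
          by_cases hmem : (Int.ofNat k) ∈ (p ++ [Int.ofNat s])
          · have hb2 : ((p ++ [Int.ofNat s]).contains ((k : Int))) = true := by
              simpa using hmem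
            rw [if_pos (decide_eq_true hmem),
                if_neg (show ¬((((adj.getD s [])[k] != 0) && !((p ++ [Int.ofNat s]).contains ((k : Int)))) = true) from by rw [hb2]; simp)]
          · have hrec := ih (p ++ [Int.ofNat s]) k hkn hmem hqel hqnd (by simp; omega) r'
            simp only [List.length_append, List.length_cons, List.length_nil] at hrec
            rw [show p.length + 1 + 1 = p.length + 2 from rfl] at hrec
            have hb1 : (((adj.getD s [])[k] != 0)) = true := bne_iff_ne.mpr h0
            have hb2 : ((p ++ [Int.ofNat s]).contains ((k : Int))) = false := by
              simpa [not_or] using hmem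
            rw [if_neg (show ¬(decide ((Int.ofNat k) ∈ (p ++ [Int.ofNat s])) = true) from by simpa [not_or] using hmem),
                if_pos (show ((((adj.getD s [])[k] != 0) && !((p ++ [Int.ofNat s]).contains ((k : Int)))) = true) from by rw [hb1, hb2]; rfl)]
            exact hrec
      rw [PySem.List.foldl_congr_mem _ _ _ _ hcong]
      rw [pvFoldl_pairs]
      have hk : adj.length - (p.length + 1) = (adj.length - (p.length + 2)) + 1 := by omega
      rw [hk, pvGrow_succ_first]
      have hstep : ([p ++ [Int.ofNat s]] : List (List Int)).flatMap (pvStepB adj) = pvStepB adj (p ++ [Int.ofNat s]) := by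
        simp
      rw [hstep]
      unfold pvStepB
      rw [h1, show (Int.ofNat s).toNat = s from rfl]
      rw [List.map_eq_flatMap, pvGrow_flatMap, pvCls_flatMap]

lemma pvFoldl_pairs2 {α : Type} (l : List α) (G H : α → List (List Int))
    (r : List (List Int) × List (List Int)) :
    l.foldl (fun r x => (r.1 ++ G x, r.2 ++ H x)) r = (r.1 ++ l.flatMap G, r.2 ++ l.flatMap H) := by
  induction l generalizing r with
  | nil => simp
  | cons x xs ih => simp [List.foldl_cons, ih, List.append_assoc]

-- ===== VERDICT (by name: the statement is the Claim_ definition above) =====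
theorem findHam_spec : Claim_equal_findHam := by
  intro adj _hdom hPre
  unfold Spec_findHam findHam findHam_alt
  simp only [pvMask_nil]
  have hcong : ∀ (r : List (List Int) × List (List Int)) (i : Nat), i ∈ List.range adj.length →
      pvDfsA adj (adj.length + 1) (Int.ofNat i) (pvMask adj.length []) [] r
        = (r.1 ++ (pvCls adj (pvGrow adj (adj.length - 1) [[Int.ofNat i]])).1,
           r.2 ++ (pvCls adj (pvGrow adj (adj.length - 1) [[Int.ofNat i]])).2) := by
    intro r i hi
    have hi' : i < adj.length := List.mem_range.mp hi
    have h := pvDfsA_main adj hPre (adj.length + 1) [] i hi' (by simp) (by simp) (by simp)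
      (by omega) r
    simpa using h
  rw [PySem.List.foldl_congr_mem _ _ _ _ hcong]
  rw [pvFoldl_pairs2]
  rw [pvGrow_foldl, List.map_eq_flatMap, pvGrow_flatMap, pvFoldl_cls]
  simp [pvCls_flatMap]
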